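-- pv_equiv track=rewrite | github.com/coci/advent_of_code | d5/p1.py | calculaterow
-- ===== SOURCE A (Python) =====
-- def split_list(a_list):
--     half = len(a_list)//2
--     return a_list[:half], a_list[half:]
--
-- def calculaterow(row):
--     index =[i for i in range(128)]
--     for i in row:
--             lower , upper = split_list(index)
--             if i == 'F':
--                 index = lower
--             else:
--                 index = upper
--     return index[0]
-- ===== SOURCE B (Python) =====
-- def calculaterow(row):
--     value = 0
--     for i, c in enumerate(row[:7]):
--         if c != 'F':
--             value += 1 << (6 - i)
--     return value
-- ===== Notes on version B (the rewrite author's own statement) =====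
-- stated objective: faster
-- what changed: B reads F/non-F as binary digits of the first 7 characters and accumulates the row number arithmetically, instead of repeatedly halving a materialised list of 128 candidate rows.
-- outside the precondition, e.g. on calculaterow('FFFFFFFF'): A raises IndexError, B returns 0
-- crash fix: On strings with an 'F' at index 7 or later A raises IndexError (the candidate list becomes empty); B returns the row number of the first 7 characters. — e.g. on calculaterow("FFFFFFFF"): A raises IndexError, B returns 0
import Mathlib
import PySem

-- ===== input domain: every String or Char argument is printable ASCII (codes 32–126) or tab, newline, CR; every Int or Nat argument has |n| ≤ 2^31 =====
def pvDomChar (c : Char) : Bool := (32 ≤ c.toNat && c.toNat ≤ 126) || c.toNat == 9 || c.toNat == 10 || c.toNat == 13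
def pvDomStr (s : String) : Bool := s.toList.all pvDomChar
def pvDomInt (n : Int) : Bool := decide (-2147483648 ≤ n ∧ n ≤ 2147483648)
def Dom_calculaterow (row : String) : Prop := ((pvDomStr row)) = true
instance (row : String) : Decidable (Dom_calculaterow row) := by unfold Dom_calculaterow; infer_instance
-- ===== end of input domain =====

-- B computes the row number directly as a 7-bit binary value (F=0, non-F=1) of the
-- first 7 characters, instead of A's repeated halving of a materialised list of 128 rows.

-- ===== PORT A =====
def split_list (a_list : List Int) : List Int × List Int :=
  let half : Int := PySem.Int.floordiv (a_list.length : Int) 2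
  (PySem.List.slice a_list none (some half), PySem.List.slice a_list (some half) none)

-- loop body of A's for-loop, as a helper
def pvStepA (index : List Int) (i : Char) : List Int :=
  let p := split_list index
  if i = 'F' then p.1 else p.2

def calculaterow (row : String) : Int :=
  (PySem.List.pyGet? (row.toList.foldl pvStepA (PySem.List.pyRange 0 128 1)) 0).getD 0
  -- Pre_ guarantees the final list is nonempty (else Python raises IndexError)

-- ===== PORT B =====
def calculaterow_alt (row : String) : Int :=
  (PySem.List.enumerate (PySem.List.slice row.toList none (some 7))).foldl
    (fun value ic => if ic.2 ≠ 'F' then value + ((1 : Int) <<< (6 - ic.1).toNat) else value) 0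

-- ===== PRECONDITION & SPEC =====
-- Pre_ excludes exactly the strings with an 'F' at index 7 or later, on which A raises IndexError.
def Pre_calculaterow (row : String) : Prop := 'F' ∉ row.toList.drop 7
instance (row : String) : Decidable (Pre_calculaterow row) := by unfold Pre_calculaterow; infer_instance

def pvWitness_calculaterow : String := "FBFBBFFRLR"

def Spec_calculaterow (row : String) (out : Int) : Prop := out = calculaterow_alt row
instance (row : String) (out : Int) : Decidable (Spec_calculaterow row out) := by unfold Spec_calculaterow; infer_instance

-- On strings with an 'F' at index 7 or later A raises IndexError; B returns the row number of the first 7 characters.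
def Raises_calculaterow (row : String) : Prop := 'F' ∈ row.toList.drop 7
instance (row : String) : Decidable (Raises_calculaterow row) := by unfold Raises_calculaterow; infer_instance
def pvRaiseWitness_calculaterow : String := "FFFFFFFF"
def pvRaiseWitnessOut_calculaterow : Int := 0

-- ===== CLAIM (what is proved, stated in full; the proofs are below) =====
def Claim_equal_calculaterow : Prop := ∀ (row : String), Dom_calculaterow row → Pre_calculaterow row → Spec_calculaterow row (calculaterow row)
def Claim_raises_calculaterow : Prop := (∀ (row : String), Dom_calculaterow row → Raises_calculaterow row → ¬ Pre_calculaterow row) ∧ (Dom_calculaterow (pvRaiseWitness_calculaterow) ∧ Raises_calculaterow (pvRaiseWitness_calculaterow) ∧ calculaterow_alt (pvRaiseWitness_calculaterow) = pvRaiseWitnessOut_calculaterow)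

-- ===== LEMMAS AND PROOFS =====

-- B's bit sum: first char has weight 2^e, next 2^(e-1), …
def pvBsum : List Char → Nat → Int
  | [], _ => 0
  | c :: cs, e => (if c = 'F' then 0 else (2:Int) ^ e) + pvBsum cs (e - 1)

-- one A-step on a contiguous range of length 2^(m+1)
lemma pvStepA_range (lo : Int) (m : Nat) (c : Char) :
    pvStepA (PySem.List.pyRange lo (lo + 2 ^ (m + 1)) 1) c =
      if c = 'F' then PySem.List.pyRange lo (lo + 2 ^ m) 1
      else PySem.List.pyRange (lo + 2 ^ m) (lo + 2 ^ (m + 1)) 1 := by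
  have hlen : ((PySem.List.pyRange lo (lo + 2 ^ (m + 1)) 1).length : Int) = 2 ^ (m + 1) := by
    rw [PySem.List.length_pyRange_one]
    have : (0:Int) ≤ 2 ^ (m+1) := by positivity
    omega
  have hhalf : PySem.Int.floordiv ((PySem.List.pyRange lo (lo + 2 ^ (m + 1)) 1).length : Int) 2
      = 2 ^ m := by
    rw [hlen, PySem.Int.floordiv_eq_ediv_of_pos (by norm_num)]
    rw [pow_succ]
    omega
  have hsplit : PySem.List.pyRange lo (lo + 2 ^ (m + 1)) 1
      = PySem.List.pyRange lo (lo + 2 ^ m) 1 ++ PySem.List.pyRange (lo + 2 ^ m) (lo + 2 ^ (m + 1)) 1 := by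
    refine PySem.List.pyRange_one_append lo (lo + 2 ^ m) (lo + 2 ^ (m + 1)) ?_ ?_
    · have : (0:Int) ≤ 2 ^ m := by positivity
      omega
    · have h : (2:Int) ^ m ≤ 2 ^ (m+1) := by
        apply pow_le_pow_right₀ <;> omega
      omega
  have hlow : PySem.List.slice (PySem.List.pyRange lo (lo + 2 ^ (m + 1)) 1) none (some ((2:Int) ^ m))
      = PySem.List.pyRange lo (lo + 2 ^ m) 1 := by
    rw [PySem.List.slice_to _ (by positivity)]
    rw [hsplit]
    apply List.take_left'
    rw [PySem.List.length_pyRange_one]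
    have : (0:Int) ≤ 2 ^ m := by positivity
    omega
  have hup : PySem.List.slice (PySem.List.pyRange lo (lo + 2 ^ (m + 1)) 1) (some ((2:Int) ^ m)) none
      = PySem.List.pyRange (lo + 2 ^ m) (lo + 2 ^ (m + 1)) 1 := by
    rw [PySem.List.slice_from _ (by positivity)]
    rw [hsplit]
    apply List.drop_left'
    rw [PySem.List.length_pyRange_one]
    have : (0:Int) ≤ 2 ^ m := by positivity
    omega
  simp only [pvStepA, split_list, hhalf, hlow, hup]

-- A's fold over at most m characters, starting from a range of length 2^m
lemma foldA_range (cs : List Char) : ∀ (lo : Int) (m : Nat), cs.length ≤ m →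
    cs.foldl pvStepA (PySem.List.pyRange lo (lo + 2 ^ m) 1)
      = PySem.List.pyRange (lo + pvBsum cs (m - 1))
          (lo + pvBsum cs (m - 1) + 2 ^ (m - cs.length)) 1 := by
  induction cs with
  | nil => intro lo m _; simp [pvBsum]
  | cons c cs ih =>
    intro lo m hm
    simp only [List.length_cons] at hm
    obtain ⟨m', rfl⟩ : ∃ m', m = m' + 1 := ⟨m - 1, by omega⟩
    rw [List.foldl_cons, pvStepA_range]
    have h2 : m' + 1 - (c :: cs).length = m' - cs.length := by
      simp only [List.length_cons]; omega
    by_cases hc : c = 'F'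
    · rw [if_pos hc, ih lo m' (by omega)]
      have h1 : lo + pvBsum cs (m' - 1) = lo + pvBsum (c :: cs) (m' + 1 - 1) := by
        simp [pvBsum, hc]
      rw [h2, h1]
    · rw [if_neg hc, show lo + 2 ^ (m' + 1) = (lo + 2 ^ m') + 2 ^ m' from by rw [pow_succ]; ring,
        ih (lo + 2 ^ m') m' (by omega)]
      have h1 : lo + 2 ^ m' + pvBsum cs (m' - 1) = lo + pvBsum (c :: cs) (m' + 1 - 1) := by
        simp [pvBsum, hc]; ring
      rw [h2, h1]

-- beyond the seventh character, a singleton state is preserved by non-'F' characters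
lemma foldA_singleton (cs : List Char) : ∀ (lo : Int), 'F' ∉ cs →
    cs.foldl pvStepA [lo] = [lo] := by
  induction cs with
  | nil => intro lo _; rfl
  | cons c cs ih =>
    intro lo h
    have hc : c ≠ 'F' := fun hc => h (by simp [hc])
    have hstep : pvStepA [lo] c = [lo] := by
      simp [pvStepA, split_list, PySem.List.slice, PySem.Int.floordiv,
        if_neg (fun hcF => hc hcF)]
    rw [List.foldl_cons, hstep, ih lo (fun hmem => h (List.mem_cons_of_mem _ hmem))]

-- B's fold computes pvBsum of the remaining characters
lemma foldB_eq (cs : List Char) : ∀ (s acc : Int), 0 ≤ s → s + cs.length ≤ 7 →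
    (PySem.List.enumerate cs s).foldl
        (fun value ic => if ic.2 ≠ 'F' then value + ((1 : Int) <<< (6 - ic.1).toNat) else value) acc
      = acc + pvBsum cs (6 - s).toNat := by
  induction cs with
  | nil => intro s acc _ _; simp [PySem.List.enumerate, pvBsum]
  | cons c cs ih =>
    intro s acc hs h7
    rw [PySem.List.enumerate_cons, List.foldl_cons]
    have hcs : (cs.length : Int) = (cs.length : Nat) := rfl
    have hs6 : s ≤ 6 := by simp only [List.length_cons] at h7; push_cast at h7; omega
    rw [ih (s + 1) _ (by omega) (by simp only [List.length_cons] at h7; push_cast at h7 ⊢; omega)]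
    have hexp : (6 - (s + 1)).toNat = (6 - s).toNat - 1 := by omega
    have hshift : ((1 : Int) <<< (((6 - s).toNat : Nat) : Int)) = 2 ^ (6 - s).toNat := by
      rw [Int.shiftLeft_natCast_right, Int.shiftLeft_eq]; ring
    simp only [pvBsum, hexp]
    by_cases hc : c = 'F'
    · simp [hc]
    · rw [if_pos (by simpa using hc), if_neg hc, hshift]
      ring

-- the first element of a nonempty range
lemma pyGet?_range_zero (lo : Int) (k : Nat) :
    PySem.List.pyGet? (PySem.List.pyRange lo (lo + 2 ^ k) 1) 0 = some lo := by
  rw [PySem.List.pyRange_one_cons (lt_add_of_pos_right lo (pow_pos (by norm_num) k))]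
  simp [PySem.List.pyGet?, PySem.List.pyIdx?]

-- ===== VERDICT (by name: the statement is the Claim_ definition above) =====
theorem calculaterow_spec : Claim_equal_calculaterow := by
  intro row _ hpre
  unfold Spec_calculaterow calculaterow calculaterow_alt
  set cs := row.toList with hcs
  have hlen7 : (cs.take 7).length ≤ 7 := by simp
  -- B's slice is take 7, and its fold is pvBsum of the first 7 characters
  have hB7 : PySem.List.slice cs none (some 7) = cs.take 7 := by
    rw [PySem.List.slice_to _ (by norm_num)]; rfl
  rw [hB7, foldB_eq (cs.take 7) 0 0 (by norm_num) (by omega)]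
  -- A's fold: split at the 7th character
  have hA0 : PySem.List.pyRange 0 128 1 = PySem.List.pyRange 0 (0 + 2 ^ 7) 1 := by norm_num
  rw [hA0]
  conv_lhs => rw [show cs = cs.take 7 ++ cs.drop 7 from (List.take_append_drop 7 cs).symm]
  rw [List.foldl_append, foldA_range _ 0 7 hlen7]
  simp only [zero_add]
  by_cases hlong : cs.length ≤ 7
  · rw [List.drop_eq_nil_of_le hlong, List.foldl_nil, pyGet?_range_zero]
    norm_num
    rfl
  · have htk : (cs.take 7).length = 7 := by simp; omega
    rw [htk]
    have hsing : PySem.List.pyRange (pvBsum (cs.take 7) (7 - 1)) (pvBsum (cs.take 7) (7 - 1) + 2 ^ (7 - 7)) 1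
        = [pvBsum (cs.take 7) (7 - 1)] := by
      norm_num [PySem.List.pyRange_one_singleton]
    rw [hsing, foldA_singleton _ _ hpre]
    norm_num
    rfl

@[simp] theorem calculaterow_raises : Claim_raises_calculaterow := by
  unfold Claim_raises_calculaterow
  exact ⟨fun row _ hr hp => hp hr, by decide⟩
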